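-- pv_equiv track=rewrite | github.com/AyudaEnPython/Soluciones | ejercicios/generar_mayor_menor_de_un_numero.py | obtener_mayor
-- ===== SOURCE A (Python) =====
-- def cantidad_de_digitos(numero: int) -> int:
--     i = 0
--     while numero > 0:
--         numero //= 10
--         i += 1
--     return i
--
-- def obtener_mayor(numero: int) -> int:
--     j = cantidad_de_digitos(numero)
--     mayor = numero % 10
--     k = 0
--     for i in range(j):
--         actual = numero % 10
--         if actual > mayor:
--             mayor = actual
--             k = i
--         numero //= 10
--     return mayor, k
-- ===== SOURCE B (Python) =====
-- def obtener_mayor(numero: int) -> int: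
--     digits = []
--     n = numero
--     while n > 0:
--         digits.append(n % 10)
--         n //= 10
--     if not digits:
--         return numero % 10, 0
--     mayor = max(digits)
--     return mayor, digits.index(mayor)
-- ===== Notes on version B (the rewrite author's own statement) =====
-- stated objective: idiomatic
-- what changed: Instead of a counted for-loop running a strict-greater max/index pair over repeated divmod, B materialises the digit list once (least-significant first) and uses max() and list.index(), falling back to (numero % 10, 0) when there are no digits.
import Mathlib
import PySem

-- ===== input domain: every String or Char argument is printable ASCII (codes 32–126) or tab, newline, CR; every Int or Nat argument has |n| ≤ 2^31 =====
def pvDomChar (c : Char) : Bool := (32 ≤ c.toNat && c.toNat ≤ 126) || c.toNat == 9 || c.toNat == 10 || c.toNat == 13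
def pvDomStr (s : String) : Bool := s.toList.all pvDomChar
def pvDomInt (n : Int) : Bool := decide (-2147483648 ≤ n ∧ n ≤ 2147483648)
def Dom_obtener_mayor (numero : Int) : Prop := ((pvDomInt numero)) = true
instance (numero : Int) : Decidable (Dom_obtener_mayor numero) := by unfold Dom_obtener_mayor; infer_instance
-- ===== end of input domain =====

-- B builds the digit list once and uses max()/list.index() instead of A's counted
-- running-max loop; same cost, more idiomatic (objective: idiomatic).

-- termination helper for the //= 10 loops (cited by name in decreasing_by)
theorem pvFdiv10_toNat_lt {n : Int} (h : 0 < n) : (PySem.Int.floordiv n 10).toNat < n.toNat := by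
  rw [PySem.Int.floordiv_eq_ediv_of_pos (by norm_num)]
  omega

-- ===== PORT A =====
-- while numero > 0: numero //= 10; i += 1
def pvCdLoop (numero i : Int) : Int :=
  if numero > 0 then pvCdLoop (PySem.Int.floordiv numero 10) (i + 1) else i
termination_by numero.toNat
decreasing_by exact pvFdiv10_toNat_lt (by omega)

def cantidad_de_digitos (numero : Int) : Int := pvCdLoop numero 0

-- for i in range(j): actual = numero % 10; if actual > mayor: mayor, k = actual, i; numero //= 10
def pvOmLoop (j i mayor k numero : Int) : Int × Int :=
  if i < j then
    let actual := PySem.Int.mod numero 10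
    if actual > mayor then
      pvOmLoop j (i + 1) actual i (PySem.Int.floordiv numero 10)
    else
      pvOmLoop j (i + 1) mayor k (PySem.Int.floordiv numero 10)
  else (mayor, k)
termination_by (j - i).toNat
decreasing_by all_goals omega

def obtener_mayor (numero : Int) : Int × Int :=
  let j := cantidad_de_digitos numero
  pvOmLoop j 0 (PySem.Int.mod numero 10) 0 numero

-- ===== PORT B =====
-- while n > 0: digits.append(n % 10); n //= 10   (list built least-significant first)
def pvDigs (n : Int) : List Int :=
  if n > 0 then PySem.Int.mod n 10 :: pvDigs (PySem.Int.floordiv n 10) else []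
termination_by n.toNat
decreasing_by exact pvFdiv10_toNat_lt (by omega)

def obtener_mayor_alt (numero : Int) : Int × Int :=
  match pvDigs numero with
  | [] => (PySem.Int.mod numero 10, 0)
  | x :: t =>
    -- max(digits): list is nonempty so max? is some; digits.index(mayor): mayor ∈ digits, so some
    let mayor := (PySem.List.max? (x :: t) (fun y => y)).getD 0
    (mayor, (((PySem.List.index? (x :: t) mayor).getD 0 : Nat) : Int))

-- ===== PRECONDITION & SPEC =====
def Spec_obtener_mayor (numero : Int) (out : Int × Int) : Prop := out = obtener_mayor_alt numero
instance (numero : Int) (out : Int × Int) : Decidable (Spec_obtener_mayor numero out) := by unfold Spec_obtener_mayor; infer_instance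

-- ===== CLAIM (what is proved, stated in full; the proofs are below) =====
def Claim_equal_obtener_mayor : Prop := ∀ (numero : Int), Dom_obtener_mayor numero → Spec_obtener_mayor numero (obtener_mayor numero)

-- ===== LEMMAS AND PROOFS =====

-- A's for-loop body, abstracted over the digit list (proof device)
def pvSem (m k i : Int) : List Int → Int × Int
  | [] => (m, k)
  | d :: t => if d > m then pvSem d i (i + 1) t else pvSem m k (i + 1) t

theorem pvLe_foldl_max (t : List Int) (m : Int) : m ≤ t.foldl max m := by
  induction t generalizing m with
  | nil => simp
  | cons d t ih => exact le_trans (le_max_left m d) (ih (max m d))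

theorem pvFoldl_max_mem (t : List Int) (m : Int) : t.foldl max m = m ∨ t.foldl max m ∈ t := by
  induction t generalizing m with
  | nil => simp
  | cons d t ih =>
    rcases ih (max m d) with h | h
    · rcases max_choice m d with hm | hm
      · left; simpa [hm] using h
      · right; simp [List.foldl, hm] at h ⊢; simp [h]
    · right; simp [List.foldl]; right; exact h

theorem pvCdLoop_eq_aux : ∀ (fuel : Nat) (n : Int), n.toNat ≤ fuel → ∀ i, pvCdLoop n i = i + ((pvDigs n).length : Int) := by
  intro fuel
  induction fuel with
  | zero =>
    intro n hn i
    have h : ¬ n > 0 := by omega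
    rw [pvCdLoop, pvDigs]; simp [h]
  | succ f ih =>
    intro n hn i
    by_cases h : n > 0
    · rw [pvCdLoop, pvDigs]
      simp only [h, if_pos]
      have hlt : (PySem.Int.floordiv n 10).toNat ≤ f := by
        have := pvFdiv10_toNat_lt h; omega
      rw [ih _ hlt]
      simp only [List.length_cons]
      push_cast; ring
    · rw [pvCdLoop, pvDigs]; simp [h]

theorem pvCdLoop_eq (n : Int) : ∀ i, pvCdLoop n i = i + ((pvDigs n).length : Int) :=
  pvCdLoop_eq_aux n.toNat n le_rfl

theorem pvBridge_aux : ∀ (fuel : Nat) (n : Int), n.toNat ≤ fuel → ∀ m k i j, j = i + ((pvDigs n).length : Int) →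
    pvOmLoop j i m k n = pvSem m k i (pvDigs n) := by
  intro fuel
  induction fuel with
  | zero =>
    intro n hn m k i j hj
    have h : ¬ n > 0 := by omega
    rw [pvDigs] at hj ⊢
    simp only [h, if_neg, not_false_iff, List.length_nil, Int.natCast_zero, add_zero] at hj ⊢
    rw [pvOmLoop]
    have : ¬ i < j := by omega
    simp [this, pvSem]
  | succ f ih =>
    intro n hn m k i j hj
    by_cases h : n > 0
    · rw [pvDigs] at hj ⊢
      simp only [h, if_pos] at hj ⊢
      have hfl : (PySem.Int.floordiv n 10).toNat ≤ f := by
        have := pvFdiv10_toNat_lt h; omega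
      have hlt : i < j := by simp only [List.length_cons] at hj; push_cast at hj; omega
      rw [pvOmLoop]
      simp only [hlt, if_pos, pvSem]
      by_cases hc : PySem.Int.mod n 10 > m
      · simp only [hc, if_pos]
        exact ih _ hfl _ _ _ _ (by simp only [List.length_cons] at hj; push_cast at hj ⊢; omega)
      · simp only [hc, if_neg, not_false_iff]
        exact ih _ hfl _ _ _ _ (by simp only [List.length_cons] at hj; push_cast at hj ⊢; omega)
    · rw [pvDigs] at hj ⊢
      simp only [h, if_neg, not_false_iff, List.length_nil, Int.natCast_zero, add_zero] at hj ⊢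
      rw [pvOmLoop]
      have : ¬ i < j := by omega
      simp [this, pvSem]

theorem pvBridge (n : Int) : ∀ m k i j, j = i + ((pvDigs n).length : Int) →
    pvOmLoop j i m k n = pvSem m k i (pvDigs n) :=
  pvBridge_aux n.toNat n le_rfl

theorem pvSem_eq (ds : List Int) : ∀ m k i,
    pvSem m k i ds =
      if ds.foldl max m > m
      then (ds.foldl max m, i + (((PySem.List.index? ds (ds.foldl max m)).getD 0 : Nat) : Int))
      else (m, k) := by
  induction ds with
  | nil => intro m k i; simp [pvSem]
  | cons d t ih =>
    intro m k i
    by_cases hd : d > m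
    · have hmax : max m d = d := max_eq_right (le_of_lt hd)
      have hM : (d :: t).foldl max m = t.foldl max d := by simp [List.foldl, hmax]
      have hMgt : (d :: t).foldl max m > m := lt_of_lt_of_le hd (by rw [hM]; exact pvLe_foldl_max t d)
      rw [pvSem]; simp only [hd, if_pos]
      rw [ih d i (i + 1), if_pos hMgt]
      by_cases ht : t.foldl max d > d
      · rw [if_pos ht]
        have hne : d ≠ t.foldl max d := ne_of_lt ht
        have hmem : t.foldl max d ∈ t := by
          rcases pvFoldl_max_mem t d with hh | hh
          · exact absurd hh.symm (by exact fun e => absurd e hne)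
          · exact hh
        obtain ⟨jx, hjx⟩ := (PySem.List.index?_isSome_iff (xs := t) (v := t.foldl max d)).mpr hmem |> Option.isSome_iff_exists.mp
        rw [hM, PySem.List.index?_cons_of_ne t hne, hjx]
        simp only [Option.map_some, Option.getD_some, Prod.mk.injEq, true_and]
        push_cast; ring
      · rw [if_neg ht]
        have hMd : t.foldl max d = d := le_antisymm (by omega) (pvLe_foldl_max t d)
        rw [hM, hMd, PySem.List.index?_cons_self]
        simp
    · have hmax : max m d = m := max_eq_left (by omega)
      have hM : (d :: t).foldl max m = t.foldl max m := by simp [List.foldl, hmax]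
      rw [pvSem]; simp only [hd, if_neg, not_false_iff]
      rw [ih m k (i + 1), hM]
      by_cases ht : t.foldl max m > m
      · rw [if_pos ht, if_pos ht]
        have hne : d ≠ t.foldl max m := by omega
        have hmem : t.foldl max m ∈ t := by
          rcases pvFoldl_max_mem t m with hh | hh
          · omega
          · exact hh
        obtain ⟨jx, hjx⟩ := (PySem.List.index?_isSome_iff (xs := t) (v := t.foldl max m)).mpr hmem |> Option.isSome_iff_exists.mp
        rw [PySem.List.index?_cons_of_ne t hne, hjx]
        simp only [Option.map_some, Option.getD_some, Prod.mk.injEq, true_and]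
        push_cast; ring
      · rw [if_neg ht, if_neg ht]

-- ===== VERDICT (by name: the statement is the Claim_ definition above) =====
theorem obtener_mayor_spec : Claim_equal_obtener_mayor := by
  intro numero _
  unfold Spec_obtener_mayor obtener_mayor obtener_mayor_alt cantidad_de_digitos
  rw [pvBridge numero _ _ _ _ (pvCdLoop_eq numero 0)]
  cases hds : pvDigs numero with
  | nil => simp [pvSem]
  | cons x t =>
    have h : numero > 0 := by
      by_contra h
      rw [pvDigs, if_neg h] at hds
      simp at hds
    rw [pvDigs, if_pos h] at hds
    injection hds with h1 h2
    subst h1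
    rw [pvSem_eq]
    dsimp only
    rw [PySem.List.max?_id_cons]
    simp only [Option.getD_some]
    have hfold : List.foldl max (PySem.Int.mod numero 10) (PySem.Int.mod numero 10 :: t)
        = List.foldl max (PySem.Int.mod numero 10) t := by simp
    rw [hfold]
    by_cases hgt : List.foldl max (PySem.Int.mod numero 10) t > PySem.Int.mod numero 10
    · rw [if_pos hgt]
      simp
    · rw [if_neg hgt]
      have hm : List.foldl max (PySem.Int.mod numero 10) t = PySem.Int.mod numero 10 :=
        le_antisymm (by omega) (pvLe_foldl_max t (PySem.Int.mod numero 10))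
      rw [hm, PySem.List.index?_cons_self]
      simp
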